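-- pv_equiv track=rewrite | github.com/arturoornelasb/tibia-bonelord-469-cipher | archive/scripts/analysis/session31_attack.py | can_form_with_swaps
-- ===== SOURCE A (Python) =====
-- from collections import Counter, defaultdict
--
-- def can_form_with_swaps(bag_remaining, word, max_swaps):
--     needed = Counter(word)
--     swaps = 0
--     temp_bag = Counter(bag_remaining)
--     for letter, count in needed.items():
--         have = temp_bag.get(letter, 0)
--         if have >= count:
--             temp_bag[letter] -= count
--             continue
--         deficit = count - have
--         if letter == 'E' and temp_bag.get('I', 0) >= deficit:
--             temp_bag['I'] -= deficit
--             swaps += deficit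
--         elif letter == 'I' and temp_bag.get('E', 0) >= deficit:
--             temp_bag['E'] -= deficit
--             swaps += deficit
--         elif letter == 'L' and temp_bag.get('I', 0) >= deficit:
--             temp_bag['I'] -= deficit
--             swaps += deficit
--         elif letter == 'I' and temp_bag.get('L', 0) >= deficit:
--             temp_bag['L'] -= deficit
--             swaps += deficit
--         else:
--             return False, 0, {}
--     if swaps > max_swaps:
--         return False, 0, {}
--     return True, swaps, dict(temp_bag)
-- ===== SOURCE B (Python) =====
-- from collections import Counter
--
-- SUBS = {'E': ('I',), 'I': ('E', 'L'), 'L': ('I',)}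
--
--
-- def can_form_with_swaps(bag_remaining, word, max_swaps):
--     def solve(items, bag, swaps):
--         if not items:
--             return (True, swaps, bag) if swaps <= max_swaps else (False, 0, {})
--         (letter, count), rest = items[0], items[1:]
--         have = bag.get(letter, 0)
--         if have >= count:
--             return solve(rest, {**bag, letter: have - count}, swaps)
--         deficit = count - have
--         source = next((s for s in SUBS.get(letter, ())
--                        if bag.get(s, 0) >= deficit), None)
--         if source is None:
--             return (False, 0, {})
--         return solve(rest, {**bag, source: bag[source] - deficit},
--                      swaps + deficit)
--
--     return solve(list(Counter(word).items()), dict(bag_remaining), 0)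
-- ===== Notes on version B (the rewrite author's own statement) =====
-- stated objective: idiomatic
-- what changed: Replaces A's four hard-coded elif branches and in-place Counter mutation by a substitution-table (dict of candidate letters) scanned with find?/next, a recursive solver over the needed items, and immutable dict updates; same counting semantics.
import Mathlib
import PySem

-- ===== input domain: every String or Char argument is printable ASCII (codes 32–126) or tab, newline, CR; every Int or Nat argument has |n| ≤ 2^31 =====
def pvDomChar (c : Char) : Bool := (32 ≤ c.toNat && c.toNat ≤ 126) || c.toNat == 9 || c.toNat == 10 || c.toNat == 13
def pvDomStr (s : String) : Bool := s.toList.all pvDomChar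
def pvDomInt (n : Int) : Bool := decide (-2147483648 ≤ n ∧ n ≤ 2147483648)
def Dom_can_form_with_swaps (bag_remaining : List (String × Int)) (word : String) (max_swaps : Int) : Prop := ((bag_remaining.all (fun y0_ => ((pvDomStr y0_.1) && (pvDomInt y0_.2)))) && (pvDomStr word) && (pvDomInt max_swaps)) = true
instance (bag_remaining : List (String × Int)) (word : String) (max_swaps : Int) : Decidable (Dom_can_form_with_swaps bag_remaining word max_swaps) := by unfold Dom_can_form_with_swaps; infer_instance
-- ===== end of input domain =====

-- B replaces A's hard-coded four-branch elif chain and in-place Counter mutation by a recursive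
-- solver over the needed items driven by a substitution table, with immutable dict updates
-- (objective: idiomatic; same asymptotic cost).

-- ===== PORT A =====
-- the for-loop over needed.items(); the early `return False, 0, {}` is `none`
def pvALoop : List (String × Int) → PySem.Dict String Int → Int → Option (Int × PySem.Dict String Int)
  | [], bag, swaps => some (swaps, bag)
  | (letter, count) :: rest, bag, swaps =>
      let haveCnt := bag.getD letter 0
      if haveCnt ≥ count then
        pvALoop rest (bag.modify letter 0 (· - count)) swaps
      else
        let deficit := count - haveCnt
        if letter = "E" ∧ bag.getD "I" 0 ≥ deficit then
          pvALoop rest (bag.modify "I" 0 (· - deficit)) (swaps + deficit)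
        else if letter = "I" ∧ bag.getD "E" 0 ≥ deficit then
          pvALoop rest (bag.modify "E" 0 (· - deficit)) (swaps + deficit)
        else if letter = "L" ∧ bag.getD "I" 0 ≥ deficit then
          pvALoop rest (bag.modify "I" 0 (· - deficit)) (swaps + deficit)
        else if letter = "I" ∧ bag.getD "L" 0 ≥ deficit then
          pvALoop rest (bag.modify "L" 0 (· - deficit)) (swaps + deficit)
        else none

def can_form_with_swaps (bag_remaining : List (String × Int)) (word : String) (max_swaps : Int) : Bool × Int × (List (String × Int)) :=
  let needed := PySem.Dict.counter (word.toList.map (fun c => String.ofList [c]))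
  let temp_bag := PySem.Dict.ofList bag_remaining
  match pvALoop needed.items temp_bag 0 with
  | none => (false, 0, [])
  | some (swaps, finalBag) =>
      if swaps > max_swaps then (false, 0, [])
      else (true, swaps, finalBag.items)

-- ===== PORT B =====
def pvSUBS : PySem.Dict String (List String) :=
  PySem.Dict.ofList [("E", ["I"]), ("I", ["E", "L"]), ("L", ["I"])]

def pvBSolve (max_swaps : Int) : List (String × Int) → PySem.Dict String Int → Int → Bool × Int × (List (String × Int))
  | [], bag, swaps => if swaps ≤ max_swaps then (true, swaps, bag.items) else (false, 0, [])
  | (letter, count) :: rest, bag, swaps =>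
      let haveCnt := bag.getD letter 0
      if haveCnt ≥ count then
        pvBSolve max_swaps rest (bag.insert letter (haveCnt - count)) swaps
      else
        let deficit := count - haveCnt
        match (pvSUBS.getD letter []).find? (fun s => decide (bag.getD s 0 ≥ deficit)) with
        | none => (false, 0, [])
        | some s => pvBSolve max_swaps rest (bag.insert s (bag.getD s 0 - deficit)) (swaps + deficit)

def can_form_with_swaps_alt (bag_remaining : List (String × Int)) (word : String) (max_swaps : Int) : Bool × Int × (List (String × Int)) :=
  pvBSolve max_swaps (PySem.Dict.counter (word.toList.map (fun c => String.ofList [c]))).items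
    (PySem.Dict.ofList bag_remaining) 0

-- ===== PRECONDITION & SPEC =====
def Spec_can_form_with_swaps (bag_remaining : List (String × Int)) (word : String) (max_swaps : Int) (out : Bool × Int × (List (String × Int))) : Prop := out = can_form_with_swaps_alt bag_remaining word max_swaps
instance (bag_remaining : List (String × Int)) (word : String) (max_swaps : Int) (out : Bool × Int × (List (String × Int))) : Decidable (Spec_can_form_with_swaps bag_remaining word max_swaps out) := by unfold Spec_can_form_with_swaps; infer_instance

-- ===== CLAIM (what is proved, stated in full; the proofs are below) =====
def Claim_equal_can_form_with_swaps : Prop := ∀ (bag_remaining : List (String × Int)) (word : String) (max_swaps : Int), Dom_can_form_with_swaps bag_remaining word max_swaps → Spec_can_form_with_swaps bag_remaining word max_swaps (can_form_with_swaps bag_remaining word max_swaps)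

-- ===== LEMMAS AND PROOFS =====

-- Counter's `d[k] -= c` (get with default 0, then set) is the plain-dict overwrite B performs
lemma pv_modify_eq_insert (d : PySem.Dict String Int) (k : String) (c : Int) :
    d.modify k 0 (· - c) = d.insert k (d.getD k 0 - c) := by
  simp [PySem.Dict.modify]

lemma pvSUBS_eq : pvSUBS = PySem.Dict.mk [("E", ["I"]), ("I", ["E", "L"]), ("L", ["I"])] := by
  decide

lemma pvSUBS_getD (letter : String) :
    pvSUBS.getD letter [] =
      if letter = "E" then ["I"]
      else if letter = "I" then ["E", "L"]
      else if letter = "L" then ["I"]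
      else [] := by
  by_cases hE : letter = "E"
  · subst hE; decide
  by_cases hI : letter = "I"
  · subst hI; decide
  by_cases hL : letter = "L"
  · subst hL; decide
  have hE' : ("E" == letter) = false := by simp; exact fun h => hE h.symm
  have hI' : ("I" == letter) = false := by simp; exact fun h => hI h.symm
  have hL' : ("L" == letter) = false := by simp; exact fun h => hL h.symm
  rw [pvSUBS_eq, PySem.Dict.getD_eq_get?_getD]
  simp [PySem.Dict.get?, hE', hI', hL', hE, hI, hL]

lemma pvLoop_eq (M : Int) (items : List (String × Int)) :
    ∀ bag swaps, pvBSolve M items bag swaps =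
      (match pvALoop items bag swaps with
       | none => (false, 0, ([] : List (String × Int)))
       | some (s, b) => if s > M then (false, 0, []) else (true, s, b.items)) := by
  induction items with
  | nil =>
      intro bag swaps
      simp only [pvBSolve, pvALoop]
      split_ifs with h1 h2 <;> first | rfl | omega
  | cons hd rest ih =>
      intro bag swaps
      obtain ⟨letter, count⟩ := hd
      simp only [pvBSolve, pvALoop]
      by_cases hge : bag.getD letter 0 ≥ count
      · rw [if_pos hge, if_pos hge, pv_modify_eq_insert]
        exact ih _ _
      · rw [if_neg hge, if_neg hge, pvSUBS_getD]
        by_cases hE : letter = "E"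
        · subst hE
          rw [if_pos rfl]
          by_cases hId : bag.getD "I" 0 ≥ count - bag.getD "E" 0
          · rw [List.find?_cons_of_pos (p := fun s => decide (bag.getD s 0 ≥ count - bag.getD "E" 0)) (by exact decide_eq_true hId),
                if_pos ⟨rfl, hId⟩, pv_modify_eq_insert]
            exact ih _ _
          · rw [List.find?_cons_of_neg (p := fun s => decide (bag.getD s 0 ≥ count - bag.getD "E" 0)) (by simpa using hId), List.find?_nil,
                if_neg (fun h => hId h.2),
                if_neg (fun h => absurd h.1 (by decide)),
                if_neg (fun h => absurd h.1 (by decide)),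
                if_neg (fun h => absurd h.1 (by decide))]
        · by_cases hI : letter = "I"
          · subst hI
            rw [if_neg (by decide), if_pos rfl]
            by_cases hEd : bag.getD "E" 0 ≥ count - bag.getD "I" 0
            · rw [List.find?_cons_of_pos (p := fun s => decide (bag.getD s 0 ≥ count - bag.getD "I" 0)) (by exact decide_eq_true hEd),
                  if_neg (fun h => absurd h.1 (by decide)),
                  if_pos ⟨rfl, hEd⟩, pv_modify_eq_insert]
              exact ih _ _
            · by_cases hLd : bag.getD "L" 0 ≥ count - bag.getD "I" 0
              · rw [List.find?_cons_of_neg (p := fun s => decide (bag.getD s 0 ≥ count - bag.getD "I" 0)) (by simpa using hEd),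
                    List.find?_cons_of_pos (p := fun s => decide (bag.getD s 0 ≥ count - bag.getD "I" 0)) (by exact decide_eq_true hLd),
                    if_neg (fun h => absurd h.1 (by decide)),
                    if_neg (fun h => hEd h.2),
                    if_neg (fun h => absurd h.1 (by decide)),
                    if_pos ⟨rfl, hLd⟩, pv_modify_eq_insert]
                exact ih _ _
              · rw [List.find?_cons_of_neg (p := fun s => decide (bag.getD s 0 ≥ count - bag.getD "I" 0)) (by simpa using hEd),
                    List.find?_cons_of_neg (p := fun s => decide (bag.getD s 0 ≥ count - bag.getD "I" 0)) (by simpa using hLd), List.find?_nil,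
                    if_neg (fun h => absurd h.1 (by decide)),
                    if_neg (fun h => hEd h.2),
                    if_neg (fun h => absurd h.1 (by decide)),
                    if_neg (fun h => hLd h.2)]
          · by_cases hL : letter = "L"
            · subst hL
              rw [if_neg (by decide), if_neg (by decide), if_pos rfl]
              by_cases hId : bag.getD "I" 0 ≥ count - bag.getD "L" 0
              · rw [List.find?_cons_of_pos (p := fun s => decide (bag.getD s 0 ≥ count - bag.getD "L" 0)) (by exact decide_eq_true hId),
                    if_neg (fun h => absurd h.1 (by decide)),
                    if_neg (fun h => absurd h.1 (by decide)),
                    if_pos ⟨rfl, hId⟩, pv_modify_eq_insert]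
                exact ih _ _
              · rw [List.find?_cons_of_neg (p := fun s => decide (bag.getD s 0 ≥ count - bag.getD "L" 0)) (by simpa using hId), List.find?_nil,
                    if_neg (fun h => absurd h.1 (by decide)),
                    if_neg (fun h => absurd h.1 (by decide)),
                    if_neg (fun h => hId h.2),
                    if_neg (fun h => absurd h.1 (by decide))]
            · rw [if_neg hE, if_neg hI, if_neg hL, List.find?_nil,
                  if_neg (fun h => hE h.1),
                  if_neg (fun h => hI h.1),
                  if_neg (fun h => hL h.1),
                  if_neg (fun h => hI h.1)]

-- ===== VERDICT (by name: the statement is the Claim_ definition above) =====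
theorem can_form_with_swaps_spec : Claim_equal_can_form_with_swaps := by
  intro bag_remaining word max_swaps _
  unfold Spec_can_form_with_swaps can_form_with_swaps can_form_with_swaps_alt
  exact (pvLoop_eq _ _ _ _).symm
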